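-- pv_equiv track=rewrite | github.com/JTibs18/LeetCode | SumOfMatrixAfterQueries.py | matrixSumQueries
-- ===== SOURCE A (Python) =====
-- def matrixSumQueries(n, queries):
--     sumVals = 0
--     colSeen = set()
--     rowsSeen = set()
--     queries = queries[::-1]
--
--     for t, i, v in queries:
--         if t == 0:
--             if i not in rowsSeen:
--                 sumVals += v * (n - len(colSeen))
--                 rowsSeen.add(i)
--         else:
--             if i not in colSeen:
--                 sumVals += v * (n - len(rowsSeen))
--                 colSeen.add(i)
--
--     return sumVals
-- ===== SOURCE B (Python) =====
-- def matrixSumQueries(n, queries):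
--     # Stateless decomposition: a query contributes iff it is the LAST write to its
--     # line; its contribution is v * (n - number of distinct opposite lines written later).
--     total = 0
--     rest = list(queries)
--     while rest:
--         t, i, v = rest.pop(0)
--         overwritten_later = any((tt == 0) == (t == 0) and ii == i for tt, ii, _ in rest)
--         if not overwritten_later:
--             total += v * (n - len({ii for tt, ii, _ in rest if (tt == 0) != (t == 0)}))
--     return total
-- ===== Notes on version B (the rewrite author's own statement) =====
-- stated objective: alternative
-- what changed: Replaces the reverse traversal with carried seen-sets by a stateless forward pass: each query that is the last write to its line contributes v*(n - number of distinct opposite lines written later), computed by rescanning the suffix per query.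
import Mathlib
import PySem

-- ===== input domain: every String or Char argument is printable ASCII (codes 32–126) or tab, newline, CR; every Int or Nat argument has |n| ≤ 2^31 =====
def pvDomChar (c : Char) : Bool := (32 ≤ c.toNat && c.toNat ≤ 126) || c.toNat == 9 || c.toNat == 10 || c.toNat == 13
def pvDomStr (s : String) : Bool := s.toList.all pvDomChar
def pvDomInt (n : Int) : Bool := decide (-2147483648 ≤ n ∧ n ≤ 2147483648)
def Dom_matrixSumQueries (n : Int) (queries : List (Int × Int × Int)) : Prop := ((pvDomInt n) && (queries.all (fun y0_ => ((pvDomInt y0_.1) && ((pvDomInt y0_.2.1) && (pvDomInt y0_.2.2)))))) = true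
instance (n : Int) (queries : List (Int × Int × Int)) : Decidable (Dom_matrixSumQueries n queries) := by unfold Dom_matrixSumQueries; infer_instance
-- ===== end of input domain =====

-- B is an 'alternative' decomposition: a stateless forward pass (each query that is the
-- last write to its line contributes v*(n - distinct opposite lines written later))
-- instead of A's reverse scan with carried seen-sets. Not claimed faster.

-- ===== PORT A =====
-- loop body of A: state is (sumVals, colSeen, rowsSeen) as introduced in the Python
def pvStepA (n : Int) (st : Int × PySem.Set Int × PySem.Set Int) (q : Int × Int × Int) :
    Int × PySem.Set Int × PySem.Set Int :=
  let (sumVals, colSeen, rowsSeen) := st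
  let (t, i, v) := q
  if t == 0 then
    if !(PySem.Set.contains rowsSeen i) then
      (sumVals + v * (n - PySem.Set.len colSeen), colSeen, PySem.Set.add rowsSeen i)
    else st
  else
    if !(PySem.Set.contains colSeen i) then
      (sumVals + v * (n - PySem.Set.len rowsSeen), PySem.Set.add colSeen i, rowsSeen)
    else st

def matrixSumQueries (n : Int) (queries : List (Int × Int × Int)) : Int :=
  -- queries = queries[::-1]  (slice? with step -1 never fails)
  let queries := (PySem.List.slice? queries none none (-1)).getD []
  (queries.foldl (pvStepA n) (0, PySem.Set.empty, PySem.Set.empty)).1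

-- ===== PORT B =====
-- 'while rest: t,i,v = rest.pop(0); …' with accumulator total
def pvGoB (n : Int) (total : Int) : List (Int × Int × Int) → Int
  | [] => total
  | (t, i, v) :: rest =>
    let overwrittenLater := rest.any (fun q => ((q.1 == 0) == (t == 0)) && (q.2.1 == i))
    if !overwrittenLater then
      pvGoB n (total + v * (n - PySem.Set.len (PySem.Set.ofList
        (rest.filterMap (fun q => if (q.1 == 0) != (t == 0) then some q.2.1 else none))))) rest
    else
      pvGoB n total rest

def matrixSumQueries_alt (n : Int) (queries : List (Int × Int × Int)) : Int :=
  pvGoB n 0 queries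

-- ===== PRECONDITION & SPEC =====
def Spec_matrixSumQueries (n : Int) (queries : List (Int × Int × Int)) (out : Int) : Prop := out = matrixSumQueries_alt n queries
instance (n : Int) (queries : List (Int × Int × Int)) (out : Int) : Decidable (Spec_matrixSumQueries n queries out) := by unfold Spec_matrixSumQueries; infer_instance

-- ===== CLAIM (what is proved, stated in full; the proofs are below) =====
def Claim_equal_matrixSumQueries : Prop := ∀ (n : Int) (queries : List (Int × Int × Int)), Dom_matrixSumQueries n queries → Spec_matrixSumQueries n queries (matrixSumQueries n queries)

-- ===== LEMMAS AND PROOFS =====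

-- accumulator lemma for B's loop
theorem pvGoB_acc (n a : Int) (qs : List (Int × Int × Int)) :
    pvGoB n a qs = a + pvGoB n 0 qs := by
  induction qs generalizing a with
  | nil => simp [pvGoB]
  | cons q rest ih =>
    obtain ⟨t, i, v⟩ := q
    by_cases h : (rest.any (fun q => ((q.1 == 0) == (t == 0)) && (q.2.1 == i))) = true
    · simp only [pvGoB, h, Bool.not_true]
      exact ih a
    · rw [Bool.not_eq_true] at h
      simp only [pvGoB, h, Bool.not_false, reduceIte]
      rw [ih (a + _), ih (0 + _)]
      ring

-- the invariant: folding the reversed suffix gives B's sum and the seen-sets of the suffix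
theorem pvMain (n : Int) (qs : List (Int × Int × Int)) :
    (qs.reverse.foldl (pvStepA n) (0, PySem.Set.empty, PySem.Set.empty)).1 = pvGoB n 0 qs ∧
    (∀ x, x ∈ (qs.reverse.foldl (pvStepA n) (0, PySem.Set.empty, PySem.Set.empty)).2.1 ↔
        ∃ q ∈ qs, ¬ q.1 = 0 ∧ q.2.1 = x) ∧
    (qs.reverse.foldl (pvStepA n) (0, PySem.Set.empty, PySem.Set.empty)).2.1.Nodup ∧
    (∀ x, x ∈ (qs.reverse.foldl (pvStepA n) (0, PySem.Set.empty, PySem.Set.empty)).2.2 ↔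
        ∃ q ∈ qs, q.1 = 0 ∧ q.2.1 = x) ∧
    (qs.reverse.foldl (pvStepA n) (0, PySem.Set.empty, PySem.Set.empty)).2.2.Nodup := by
  induction qs with
  | nil => simp [pvGoB, PySem.Set.empty]
  | cons q qs ih =>
    obtain ⟨t, i, v⟩ := q
    obtain ⟨ih1, ih2, ihn2, ih3, ihn3⟩ := ih
    simp only [List.reverse_cons, List.foldl_append, List.foldl_cons, List.foldl_nil]
    set st := qs.reverse.foldl (pvStepA n) (0, PySem.Set.empty, PySem.Set.empty) with hst
    by_cases ht : (t == 0) = true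
    · -- row query
      have ht' : t = 0 := by simpa using ht
      have hany : (qs.any fun q => ((q.1 == 0) == (t == 0)) && (q.2.1 == i)) = true ↔
          i ∈ st.2.2 := by
        rw [List.any_eq_true, ih3 i]
        constructor
        · rintro ⟨q, hq, hb⟩
          simp only [ht, Bool.and_eq_true, beq_iff_eq] at hb
          exact ⟨q, hq, by simpa using hb.1, hb.2⟩
        · rintro ⟨q, hq, h1, h2⟩
          exact ⟨q, hq, by simp [ht, h1, h2]⟩
      by_cases hr : PySem.Set.contains st.2.2 i = true
      · have hi : i ∈ st.2.2 := (PySem.Set.contains_iff _ _).1 hr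
        have hA : pvStepA n st (t, i, v) = st := by
          simp [pvStepA, ht, hi]
        rw [hA]
        refine ⟨?_, ?_, ihn2, ?_, ihn3⟩
        · simp only [pvGoB, hany.2 hi, Bool.not_true]
          exact ih1
        · intro x
          rw [ih2 x]
          simp only [List.mem_cons]
          constructor
          · rintro ⟨q, hq, h1, h2⟩; exact ⟨q, Or.inr hq, h1, h2⟩
          · rintro ⟨q, hq | hq, h1, h2⟩
            · cases hq; exact absurd ht' h1
            · exact ⟨q, hq, h1, h2⟩
        · intro x
          rw [ih3 x]
          simp only [List.mem_cons]
          constructor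
          · rintro ⟨q, hq, h1, h2⟩; exact ⟨q, Or.inr hq, h1, h2⟩
          · rintro ⟨q, hq | hq, h1, h2⟩
            · cases hq; exact h2 ▸ ((ih3 i).1 hi)
            · exact ⟨q, hq, h1, h2⟩
      · have hi : i ∉ st.2.2 := fun hmem => hr ((PySem.Set.contains_iff _ _).2 hmem)
        have hA : pvStepA n st (t, i, v) =
            (st.1 + v * (n - PySem.Set.len st.2.1), st.2.1, PySem.Set.add st.2.2 i) := by
          simp [pvStepA, ht, hi]
        rw [hA]
        have hlen : PySem.Set.len st.2.1 = PySem.Set.len (PySem.Set.ofList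
            (qs.filterMap (fun q => if (q.1 == 0) != (t == 0) then some q.2.1 else none))) := by
          have hperm : st.2.1.Perm (PySem.Set.ofList
              (qs.filterMap (fun q => if (q.1 == 0) != (t == 0) then some q.2.1 else none))) := by
            rw [List.perm_ext_iff_of_nodup ihn2 (PySem.Set.nodup_ofList _)]
            intro x
            rw [ih2 x, PySem.Set.mem_ofList, List.mem_filterMap]
            constructor
            · rintro ⟨q, hq, h1, h2⟩
              exact ⟨q, hq, by simp [ht, h1, h2]⟩
            · rintro ⟨q, hq, hb⟩
              simp only [ht] at hb
              by_cases hq1 : (q.1 == 0) = true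
              · simp [hq1] at hb
              · rw [Bool.not_eq_true] at hq1
                simp only [hq1] at hb
                simp only [show (false != true) = true from rfl, if_true, Option.some.injEq] at hb
                exact ⟨q, hq, by simpa using hq1, hb⟩
          simp [PySem.Set.len, hperm.length_eq]
        refine ⟨?_, ?_, ihn2, ?_, PySem.Set.nodup_add _ _ ihn3⟩
        · have hnot : (qs.any fun q => ((q.1 == 0) == (t == 0)) && (q.2.1 == i)) = false := by
            rw [Bool.eq_false_iff]
            intro hcon
            exact hi (hany.1 hcon)
          simp only [pvGoB, hnot, Bool.not_false, reduceIte]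
          rw [pvGoB_acc, ih1, hlen]
          ring
        · intro x
          rw [ih2 x]
          simp only [List.mem_cons]
          constructor
          · rintro ⟨q, hq, h1, h2⟩; exact ⟨q, Or.inr hq, h1, h2⟩
          · rintro ⟨q, hq | hq, h1, h2⟩
            · cases hq; exact absurd ht' h1
            · exact ⟨q, hq, h1, h2⟩
        · intro x
          rw [PySem.Set.mem_add, ih3 x]
          simp only [List.mem_cons]
          constructor
          · rintro (⟨q, hq, h1, h2⟩ | hx)
            · exact ⟨q, Or.inr hq, h1, h2⟩
            · exact ⟨(t, i, v), Or.inl rfl, ht', hx.symm⟩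
          · rintro ⟨q, hq | hq, h1, h2⟩
            · cases hq; exact Or.inr h2.symm
            · exact Or.inl ⟨q, hq, h1, h2⟩
    · -- column query
      have ht0 : ¬ t = 0 := by simpa using ht
      rw [Bool.not_eq_true] at ht
      have hany : (qs.any fun q => ((q.1 == 0) == (t == 0)) && (q.2.1 == i)) = true ↔
          i ∈ st.2.1 := by
        rw [List.any_eq_true, ih2 i]
        constructor
        · rintro ⟨q, hq, hb⟩
          simp only [ht, Bool.and_eq_true, beq_iff_eq] at hb
          refine ⟨q, hq, ?_, hb.2⟩
          simpa using hb.1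
        · rintro ⟨q, hq, h1, h2⟩
          refine ⟨q, hq, ?_⟩
          simp only [ht, Bool.and_eq_true, beq_iff_eq]
          exact ⟨by simpa using h1, h2⟩
      by_cases hr : PySem.Set.contains st.2.1 i = true
      · have hi : i ∈ st.2.1 := (PySem.Set.contains_iff _ _).1 hr
        have hA : pvStepA n st (t, i, v) = st := by
          simp [pvStepA, ht, hi]
        rw [hA]
        refine ⟨?_, ?_, ihn2, ?_, ihn3⟩
        · simp only [pvGoB, hany.2 hi, Bool.not_true]
          exact ih1
        · intro x
          rw [ih2 x]
          simp only [List.mem_cons]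
          constructor
          · rintro ⟨q, hq, h1, h2⟩; exact ⟨q, Or.inr hq, h1, h2⟩
          · rintro ⟨q, hq | hq, h1, h2⟩
            · cases hq; exact h2 ▸ ((ih2 i).1 hi)
            · exact ⟨q, hq, h1, h2⟩
        · intro x
          rw [ih3 x]
          simp only [List.mem_cons]
          constructor
          · rintro ⟨q, hq, h1, h2⟩; exact ⟨q, Or.inr hq, h1, h2⟩
          · rintro ⟨q, hq | hq, h1, h2⟩
            · cases hq; exact absurd h1 ht0
            · exact ⟨q, hq, h1, h2⟩
      · have hi : i ∉ st.2.1 := fun hmem => hr ((PySem.Set.contains_iff _ _).2 hmem)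
        have hA : pvStepA n st (t, i, v) =
            (st.1 + v * (n - PySem.Set.len st.2.2), PySem.Set.add st.2.1 i, st.2.2) := by
          simp [pvStepA, ht, hi]
        rw [hA]
        have hlen : PySem.Set.len st.2.2 = PySem.Set.len (PySem.Set.ofList
            (qs.filterMap (fun q => if (q.1 == 0) != (t == 0) then some q.2.1 else none))) := by
          have hperm : st.2.2.Perm (PySem.Set.ofList
              (qs.filterMap (fun q => if (q.1 == 0) != (t == 0) then some q.2.1 else none))) := by
            rw [List.perm_ext_iff_of_nodup ihn3 (PySem.Set.nodup_ofList _)]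
            intro x
            rw [ih3 x, PySem.Set.mem_ofList, List.mem_filterMap]
            constructor
            · rintro ⟨q, hq, h1, h2⟩
              exact ⟨q, hq, by simp [ht, h1, h2]⟩
            · rintro ⟨q, hq, hb⟩
              simp only [ht] at hb
              by_cases hq1 : (q.1 == 0) = true
              · simp only [hq1, show (true != false) = true from rfl, if_true, Option.some.injEq] at hb
                exact ⟨q, hq, by simpa using hq1, hb⟩
              · rw [Bool.not_eq_true] at hq1
                simp [hq1] at hb
          simp [PySem.Set.len, hperm.length_eq]
        refine ⟨?_, ?_, PySem.Set.nodup_add _ _ ihn2, ?_, ihn3⟩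
        · have hnot : (qs.any fun q => ((q.1 == 0) == (t == 0)) && (q.2.1 == i)) = false := by
            rw [Bool.eq_false_iff]
            intro hcon
            exact hi (hany.1 hcon)
          simp only [pvGoB, hnot, Bool.not_false, reduceIte]
          rw [pvGoB_acc, ih1, hlen]
          ring
        · intro x
          rw [PySem.Set.mem_add, ih2 x]
          simp only [List.mem_cons]
          constructor
          · rintro (⟨q, hq, h1, h2⟩ | hx)
            · exact ⟨q, Or.inr hq, h1, h2⟩
            · exact ⟨(t, i, v), Or.inl rfl, ht0, hx.symm⟩
          · rintro ⟨q, hq | hq, h1, h2⟩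
            · cases hq; exact Or.inr h2.symm
            · exact Or.inl ⟨q, hq, h1, h2⟩
        · intro x
          rw [ih3 x]
          simp only [List.mem_cons]
          constructor
          · rintro ⟨q, hq, h1, h2⟩; exact ⟨q, Or.inr hq, h1, h2⟩
          · rintro ⟨q, hq | hq, h1, h2⟩
            · cases hq; exact absurd h1 ht0
            · exact ⟨q, hq, h1, h2⟩

-- ===== VERDICT (by name: the statement is the Claim_ definition above) =====
theorem matrixSumQueries_spec : Claim_equal_matrixSumQueries := by
  intro n queries _
  unfold Spec_matrixSumQueries matrixSumQueries matrixSumQueries_alt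
  rw [PySem.List.slice?_none_none_neg_one]
  exact (pvMain n queries).1
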